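-- pv_equiv track=rewrite | github.com/geraw/logic_simulator | challenges/01-counter/score.py | validate_counter
-- ===== SOURCE A (Python) =====
-- from typing import Dict, Any
--
-- def validate_counter(outputs: Dict[str, str], test_case: Dict[str, Any]) -> bool:
--     """
--     Validate that the circuit correctly implements a running 3-bit counter
--     that increments when the input 'I' is 1.
--     """
--     inputs = test_case['inputs']
--     i_input = inputs['I']
--
--     running_count = 0
--     expected_o0 = ""
--     expected_o1 = ""
--     expected_o2 = ""
--
--     for bit in i_input:
--         if bit == '1':
--             running_count = (running_count + 1) % 8
--
--         expected_o0 += str((running_count >> 0) & 1)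
--         expected_o1 += str((running_count >> 1) & 1)
--         expected_o2 += str((running_count >> 2) & 1)
--
--     actual_o0 = outputs.get('O0', '')
--     actual_o1 = outputs.get('O1', '')
--     actual_o2 = outputs.get('O2', '')
--
--     return actual_o0 == expected_o0 and actual_o1 == expected_o1 and actual_o2 == expected_o2
-- ===== SOURCE B (Python) =====
-- def validate_counter(outputs, test_case):
--     # Checker instead of generator: decode the claimed outputs position by
--     # position and verify the mod-8 counter transition relation, failing fast.
--     i_input = test_case['inputs']['I']
--     o0 = outputs.get('O0', '')
--     o1 = outputs.get('O1', '')
--     o2 = outputs.get('O2', '')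
--     n = len(i_input)
--     if len(o0) != n or len(o1) != n or len(o2) != n:
--         return False
--     c = 0
--     for bit, a0, a1, a2 in zip(i_input, o0, o1, o2):
--         if bit == '1':
--             c = (c + 1) % 8
--         if a0 != "01"[c & 1] or a1 != "01"[(c >> 1) & 1] or a2 != "01"[(c >> 2) & 1]:
--             return False
--     return True
-- ===== Notes on version B (the rewrite author's own statement) =====
-- stated objective: alternative
-- what changed: B is a checker instead of a generator: it builds no expected strings; it first compares the three output lengths against the input length, then walks the zipped input/output characters once, verifying the mod-8 counter transition at each position and failing fast on the first mismatch.
import Mathlib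
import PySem

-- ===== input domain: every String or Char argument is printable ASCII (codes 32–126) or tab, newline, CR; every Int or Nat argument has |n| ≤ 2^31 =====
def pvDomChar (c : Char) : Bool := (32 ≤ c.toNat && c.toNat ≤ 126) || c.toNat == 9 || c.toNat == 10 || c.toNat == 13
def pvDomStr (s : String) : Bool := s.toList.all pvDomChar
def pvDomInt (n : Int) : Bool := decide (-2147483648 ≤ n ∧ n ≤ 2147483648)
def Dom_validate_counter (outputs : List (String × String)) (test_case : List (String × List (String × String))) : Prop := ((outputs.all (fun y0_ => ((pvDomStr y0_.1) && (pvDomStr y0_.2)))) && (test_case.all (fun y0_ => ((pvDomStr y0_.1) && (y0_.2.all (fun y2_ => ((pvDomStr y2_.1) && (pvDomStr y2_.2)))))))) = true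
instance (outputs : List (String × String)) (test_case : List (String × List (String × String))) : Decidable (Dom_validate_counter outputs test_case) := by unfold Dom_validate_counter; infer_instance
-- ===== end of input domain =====

-- B is a checker instead of a generator: it never builds the expected strings; it first
-- checks the three output lengths, then walks the zipped input/output characters verifying
-- the mod-8 counter transition per position, failing fast. Same O(n) cost (alternative).

-- ===== PORT A =====
-- A's loop body: update the running count, append one bit-character to each expected string.
-- Python's (rc >> k) & 1 is ported exactly as (rc // 2^k) % 2 (equal for every int in Python);
-- the growing Python strings are represented as List Char.
def pvStepA (s : Int × List Char × List Char × List Char) (bit : Char) :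
    Int × List Char × List Char × List Char :=
  let rc := if bit == '1' then PySem.Int.mod (s.1 + 1) 8 else s.1
  (rc,
   s.2.1 ++ (PySem.Int.toStr (PySem.Int.mod (PySem.Int.floordiv rc 1) 2)).toList,
   s.2.2.1 ++ (PySem.Int.toStr (PySem.Int.mod (PySem.Int.floordiv rc 2) 2)).toList,
   s.2.2.2 ++ (PySem.Int.toStr (PySem.Int.mod (PySem.Int.floordiv rc 4) 2)).toList)

def validate_counter (outputs : List (String × String)) (test_case : List (String × List (String × String))) : Bool :=
  let inputs := (PySem.Dict.mk test_case).getD "inputs" []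
  let i_input := (PySem.Dict.mk inputs).getD "I" ""
  let st := i_input.toList.foldl pvStepA (0, [], [], [])
  ((PySem.Dict.mk outputs).getD "O0" "").toList == st.2.1 &&
  (((PySem.Dict.mk outputs).getD "O1" "").toList == st.2.2.1 &&
   (((PySem.Dict.mk outputs).getD "O2" "").toList == st.2.2.2))

-- ===== PORT B =====
-- "01"[(c // d) % 2]  (d = 1, 2, 4 for (c >> 0/1/2) & 1)
def pvDigit (d : Int) (c : Int) : Option Char :=
  PySem.List.pyGet? "01".toList (PySem.Int.mod (PySem.Int.floordiv c d) 2)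

-- the zipped verification loop of B, failing fast; true when the zip runs out
def pvCheck : Int → List Char → List Char → List Char → List Char → Bool
  | c, b :: bs, a0 :: r0, a1 :: r1, a2 :: r2 =>
      let c' := if b == '1' then PySem.Int.mod (c + 1) 8 else c
      if some a0 != pvDigit 1 c' || some a1 != pvDigit 2 c' || some a2 != pvDigit 4 c' then
        false
      else pvCheck c' bs r0 r1 r2
  | _, _, _, _, _ => true

def validate_counter_alt (outputs : List (String × String)) (test_case : List (String × List (String × String))) : Bool :=
  let inputs := (PySem.Dict.mk test_case).getD "inputs" []
  let i_input := ((PySem.Dict.mk inputs).getD "I" "").toList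
  let o0 := ((PySem.Dict.mk outputs).getD "O0" "").toList
  let o1 := ((PySem.Dict.mk outputs).getD "O1" "").toList
  let o2 := ((PySem.Dict.mk outputs).getD "O2" "").toList
  if o0.length != i_input.length || o1.length != i_input.length || o2.length != i_input.length then
    false
  else pvCheck 0 i_input o0 o1 o2

-- ===== PRECONDITION & SPEC =====
-- Pre_ excludes exactly the inputs where Python A raises KeyError: test_case without an
-- 'inputs' entry, or whose 'inputs' dict has no 'I' entry.
def Pre_validate_counter (outputs : List (String × String)) (test_case : List (String × List (String × String))) : Prop :=
  ((PySem.Dict.mk test_case).get? "inputs").isSome = true ∧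
  ((PySem.Dict.mk (((PySem.Dict.mk test_case).get? "inputs").getD [])).get? "I").isSome = true
instance (outputs : List (String × String)) (test_case : List (String × List (String × String))) : Decidable (Pre_validate_counter outputs test_case) := by unfold Pre_validate_counter; infer_instance

def pvWitness_validate_counter : (List (String × String)) × (List (String × List (String × String))) :=
  ([("O0", "110"), ("O1", "010"), ("O2", "000")], [("inputs", [("I", "110")])])

def Spec_validate_counter (outputs : List (String × String)) (test_case : List (String × List (String × String))) (out : Bool) : Prop := out = validate_counter_alt outputs test_case
instance (outputs : List (String × String)) (test_case : List (String × List (String × String))) (out : Bool) : Decidable (Spec_validate_counter outputs test_case out) := by unfold Spec_validate_counter; infer_instance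

-- ===== CLAIM (what is proved, stated in full; the proofs are below) =====
def Claim_equal_validate_counter : Prop := ∀ (outputs : List (String × String)) (test_case : List (String × List (String × String))), Dom_validate_counter outputs test_case → Pre_validate_counter outputs test_case → Spec_validate_counter outputs test_case (validate_counter outputs test_case)

-- ===== LEMMAS AND PROOFS =====

-- the bit-character A appends for divisor d at count c
def pvDch (d c : Int) : Char :=
  if PySem.Int.mod (PySem.Int.floordiv c d) 2 == 1 then '1' else '0'

-- the expected bit-plane for divisor d, as A generates it
def pvE (d : Int) (c : Int) : List Char → List Char
  | [] => []
  | b :: bs =>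
      let c' := if b == '1' then PySem.Int.mod (c + 1) 8 else c
      pvDch d c' :: pvE d c' bs

-- the running count after consuming all bits
def pvLastC (c : Int) : List Char → Int
  | [] => c
  | b :: bs => pvLastC (if b == '1' then PySem.Int.mod (c + 1) 8 else c) bs

theorem pvMod2 (x : Int) : PySem.Int.mod x 2 = 0 ∨ PySem.Int.mod x 2 = 1 := by
  have h0 := PySem.Int.mod_nonneg x (b := 2) (by omega)
  have h1 := PySem.Int.mod_lt x (b := 2) (by omega)
  omega

theorem pvToChars_mod2 (y : Int) :
    PySem.Int.toChars (y % 2) = [if y % 2 = 1 then '1' else '0'] := by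
  have h : y % 2 = 0 ∨ y % 2 = 1 := by omega
  rcases h with h | h <;> rw [h] <;> decide

theorem pvDigit_eq (d c : Int) : pvDigit d c = some (pvDch d c) := by
  unfold pvDigit pvDch
  rcases pvMod2 (PySem.Int.floordiv c d) with h | h <;> rw [h] <;> decide

theorem pvFoldA_eq (bits : List Char) : ∀ (c : Int) (e0 e1 e2 : List Char),
    bits.foldl pvStepA (c, e0, e1, e2) =
      (pvLastC c bits, e0 ++ pvE 1 c bits, e1 ++ pvE 2 c bits, e2 ++ pvE 4 c bits) := by
  induction bits with
  | nil => intro c e0 e1 e2; simp [pvE, pvLastC]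
  | cons b r ih =>
      intro c e0 e1 e2
      simp only [List.foldl_cons, pvStepA, pvE, pvLastC]
      rw [ih]
      simp [pvDch, pvToChars_mod2]

theorem pvCheck_iff (bits : List Char) : ∀ (c : Int) (o0 o1 o2 : List Char),
    (o0.length = bits.length ∧ o1.length = bits.length ∧ o2.length = bits.length ∧
      pvCheck c bits o0 o1 o2 = true) ↔
    (o0 = pvE 1 c bits ∧ o1 = pvE 2 c bits ∧ o2 = pvE 4 c bits) := by
  induction bits with
  | nil =>
      intro c o0 o1 o2
      cases o0 <;> cases o1 <;> cases o2 <;> simp [pvCheck, pvE]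
  | cons b bs ih =>
      intro c o0 o1 o2
      cases o0 with
      | nil => simp [pvE]
      | cons a0 r0 =>
        cases o1 with
        | nil => simp [pvE]
        | cons a1 r1 =>
          cases o2 with
          | nil => simp [pvE]
          | cons a2 r2 =>
            simp only [pvCheck, pvE, pvDigit_eq, List.length_cons, List.cons.injEq]
            split_ifs with hb h h <;>
            first
            | -- failing position: both sides are false
              (constructor
               · rintro ⟨-, -, -, ⟨⟩⟩
               · rintro ⟨⟨e0, -⟩, ⟨e1, -⟩, ⟨e2, -⟩⟩; simp [e0, e1, e2] at h)
            | -- matching position: peel the heads and use the induction hypothesis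
              (simp only [Bool.or_eq_true, bne_iff_ne, ne_eq, Option.some.injEq, not_or,
                 not_not] at h
               obtain ⟨⟨g0, g1⟩, g2⟩ := h
               constructor
               · rintro ⟨l0, l1, l2, hrec⟩
                 have hr := (ih _ r0 r1 r2).mp ⟨by omega, by omega, by omega, hrec⟩
                 exact ⟨⟨g0, hr.1⟩, ⟨g1, hr.2.1⟩, ⟨g2, hr.2.2⟩⟩
               · rintro ⟨⟨-, e0⟩, ⟨-, e1⟩, ⟨-, e2⟩⟩
                 have hl := (ih _ r0 r1 r2).mpr ⟨e0, e1, e2⟩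
                 exact ⟨by omega, by omega, by omega, hl.2.2.2⟩)

-- ===== VERDICT (by name: the statement is the Claim_ definition above) =====
theorem validate_counter_spec : Claim_equal_validate_counter := by
  intro outputs test_case _ _
  unfold Spec_validate_counter validate_counter validate_counter_alt
  simp only []
  rw [pvFoldA_eq]
  set i := ((PySem.Dict.mk ((PySem.Dict.mk test_case).getD "inputs" [])).getD "I" "").toList
  set o0 := ((PySem.Dict.mk outputs).getD "O0" "").toList
  set o1 := ((PySem.Dict.mk outputs).getD "O1" "").toList
  set o2 := ((PySem.Dict.mk outputs).getD "O2" "").toList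
  rw [Bool.eq_iff_iff]
  simp only [List.nil_append, Bool.and_eq_true, beq_iff_eq]
  constructor
  · rintro ⟨h0, h1, h2⟩
    have hc := (pvCheck_iff i 0 o0 o1 o2).mpr ⟨h0, h1, h2⟩
    simp [hc.1, hc.2.1, hc.2.2.1, hc.2.2.2]
  · intro hB
    split at hB
    · exact absurd hB (by simp)
    · rename_i hif
      simp only [Bool.or_eq_true, bne_iff_ne, ne_eq, not_or, not_not] at hif
      exact (pvCheck_iff i 0 o0 o1 o2).mp ⟨hif.1.1, hif.1.2, hif.2, hB⟩
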